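-- pv_equiv track=rewrite | github.com/AmiltonCabral/programacao-1 | Unidade 10/colegas-de-sala/solucao.py | colegas_de_sala
-- ===== SOURCE A (Python) =====
-- def colegas_de_sala(salas, professor):
--     num_sala = -1
--     alunos_sala = []
--     for pessoa in salas:
--         if pessoa == professor:
--             num_sala = salas[pessoa]
--             break
--     for aluno in salas:
--         if salas[aluno] == num_sala and aluno != professor:
--             alunos_sala.append(aluno)
--
--     return alunos_sala
-- ===== SOURCE B (Python) =====
-- def colegas_de_sala(salas, professor):
--     grupos = {}
--     for pessoa, sala in salas.items():
--         grupos.setdefault(sala, []).append(pessoa)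
--     num_sala = salas.get(professor, -1)
--     return [p for p in grupos.get(num_sala, []) if p != professor]
-- ===== Notes on version B (the rewrite author's own statement) =====
-- stated objective: alternative
-- what changed: Instead of one scan to find the professor's room plus a second scan that re-looks-up each person's room via salas[aluno], B builds a room->people grouping dict in a single pass and returns the professor's group (looked up with salas.get(professor, -1)) minus the professor.
import Mathlib
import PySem

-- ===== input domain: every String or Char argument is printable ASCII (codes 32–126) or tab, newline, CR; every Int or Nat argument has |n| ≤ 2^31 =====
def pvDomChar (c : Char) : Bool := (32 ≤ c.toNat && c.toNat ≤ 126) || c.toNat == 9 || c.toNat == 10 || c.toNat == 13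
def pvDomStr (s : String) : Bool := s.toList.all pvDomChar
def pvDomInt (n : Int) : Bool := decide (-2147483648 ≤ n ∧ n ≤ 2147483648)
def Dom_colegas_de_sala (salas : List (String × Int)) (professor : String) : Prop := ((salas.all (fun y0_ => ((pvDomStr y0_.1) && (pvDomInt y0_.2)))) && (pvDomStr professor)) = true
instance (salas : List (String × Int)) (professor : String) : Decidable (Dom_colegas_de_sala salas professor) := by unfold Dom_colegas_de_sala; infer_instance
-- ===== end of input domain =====

-- B replaces A's find-room scan + per-person re-lookup scan with a one-pass room->people grouping dict; salas is a Python dict, so Pre_ assumes its keys are distinct.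
-- ===== PORT A =====
-- first loop: 'for pessoa in salas: if pessoa == professor: num_sala = salas[pessoa]; break' (starting from num_sala = -1)
def aFindRoom (d : PySem.Dict String Int) (prof : String) : List (String × Int) → Int
  | [] => -1
  | p :: t => if p.1 == prof then d.getD p.1 (-1) else aFindRoom d prof t
-- salas[pessoa]/salas[aluno] is ported as d.getD _ (-1); the key is always present (it comes from the dict's own iteration), so the default is never used
def colegas_de_sala (salas : List (String × Int)) (professor : String) : List String :=
  let d : PySem.Dict String Int := PySem.Dict.mk salas
  let num_sala := aFindRoom d professor salas
  salas.foldl (fun alunos_sala aluno =>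
    if d.getD aluno.1 (-1) == num_sala && aluno.1 != professor then alunos_sala ++ [aluno.1]
    else alunos_sala) []

-- ===== PORT B =====
def colegas_de_sala_alt (salas : List (String × Int)) (professor : String) : List String :=
  let grupos : PySem.Dict Int (List String) :=
    salas.foldl (fun g p => g.modify p.2 [] (· ++ [p.1])) PySem.Dict.empty
  let num_sala := (PySem.Dict.mk salas).getD professor (-1)
  (grupos.getD num_sala []).filter (fun p => p != professor)

-- ===== PRECONDITION & SPEC =====
-- Pre_ says the association list has distinct keys: it represents a Python dict, which cannot hold duplicate keys, so no actual input of A is excluded.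
def Pre_colegas_de_sala (salas : List (String × Int)) (professor : String) : Prop :=
  (salas.map Prod.fst).Nodup
instance (salas : List (String × Int)) (professor : String) : Decidable (Pre_colegas_de_sala salas professor) := by unfold Pre_colegas_de_sala; infer_instance
def pvWitness_colegas_de_sala : (List (String × Int)) × String := ([("ana", 3), ("bia", 3), ("edu", 2)], "ana")
def Spec_colegas_de_sala (salas : List (String × Int)) (professor : String) (out : List String) : Prop := out = colegas_de_sala_alt salas professor
instance (salas : List (String × Int)) (professor : String) (out : List String) : Decidable (Spec_colegas_de_sala salas professor out) := by unfold Spec_colegas_de_sala; infer_instance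

-- ===== CLAIM (what is proved, stated in full; the proofs are below) =====
def Claim_equal_colegas_de_sala : Prop := ∀ (salas : List (String × Int)) (professor : String), Dom_colegas_de_sala salas professor → Pre_colegas_de_sala salas professor → Spec_colegas_de_sala salas professor (colegas_de_sala salas professor)

-- ===== LEMMAS AND PROOFS =====

-- A's first loop returns the dict lookup of professor whenever some key matches, else -1
theorem aFindRoom_eq (d : PySem.Dict String Int) (prof : String) (rem : List (String × Int)) :
    aFindRoom d prof rem = if rem.any (fun p => p.1 == prof) then d.getD prof (-1) else -1 := by
  induction rem with
  | nil => simp [aFindRoom]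
  | cons p t ih =>
    by_cases h : p.1 = prof
    · simp [aFindRoom, h]
    · have hb : (p.1 == prof) = false := by simpa using h
      simp only [aFindRoom, List.any_cons, hb, Bool.false_or, ih]
      rw [if_neg (by simp [h])]

-- hence num_sala agrees with B's salas.get(professor, -1)
theorem aFindRoom_full (salas : List (String × Int)) (prof : String) :
    aFindRoom (PySem.Dict.mk salas) prof salas = (PySem.Dict.mk salas).getD prof (-1) := by
  rw [aFindRoom_eq]
  by_cases h : salas.any (fun p => p.1 == prof)
  · simp [h]
  · have hc : (PySem.Dict.mk salas).contains prof = false := by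
      simp only [PySem.Dict.contains]
      exact eq_false_of_ne_true h
    simp [h, PySem.Dict.getD_of_not_contains _ _ hc]

-- B's grouping loop: the group of room c collects, in order, the names of the pairs whose room is c
theorem group_getD (l : List (String × Int)) (g : PySem.Dict Int (List String)) (c : Int) :
    (l.foldl (fun g p => g.modify p.2 [] (· ++ [p.1])) g).getD c []
      = g.getD c [] ++ (l.filter (fun p => p.2 == c)).map (·.1) := by
  induction l generalizing g with
  | nil => simp
  | cons p t ih =>
    simp only [List.foldl_cons, ih, List.filter_cons]
    by_cases h : p.2 = c
    · simp [h, PySem.Dict.getD_modify]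
    · simp [h, PySem.Dict.getD_modify, Ne.symm h]

-- in a dict with distinct keys, looking a key back up returns that pair's value
theorem getD_pair (salas : List (String × Int)) (hn : (salas.map Prod.fst).Nodup)
    (p : String × Int) (hp : p ∈ salas) :
    (PySem.Dict.mk salas).getD p.1 (-1) = p.2 := by
  exact PySem.Dict.getD_of_mem_items (PySem.Dict.mk salas) (k := p.1) (v := p.2)
    (by simpa using hp) (by simpa [PySem.Dict.keys] using hn) (-1)

-- ===== VERDICT (by name: the statement is the Claim_ definition above) =====
theorem colegas_de_sala_spec : Claim_equal_colegas_de_sala := by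
  intro salas professor _ hpre
  unfold Spec_colegas_de_sala colegas_de_sala colegas_de_sala_alt
  simp only [aFindRoom_full, group_getD]
  set n := (PySem.Dict.mk salas).getD professor (-1) with hn
  have hcong : salas.foldl (fun alunos_sala aluno =>
      if (PySem.Dict.mk salas).getD aluno.1 (-1) == n && aluno.1 != professor
      then alunos_sala ++ [aluno.1] else alunos_sala) []
    = salas.foldl (fun alunos_sala aluno =>
      if aluno.2 == n && aluno.1 != professor
      then alunos_sala ++ [aluno.1] else alunos_sala) [] := by
    apply PySem.List.foldl_congr_mem
    intro acc x hx
    rw [getD_pair salas hpre x hx]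
  rw [hcong, PySem.List.foldl_append_if]
  simp only [PySem.Dict.getD_empty, List.nil_append]
  rw [List.filter_map]
  congr 1
  rw [List.filter_filter]
  apply List.filter_congr
  intro x _
  simp [Bool.and_comm]
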